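-- pv_equiv track=rewrite | github.com/Zhenya1313/TetrahedralNumber | main.py | generate_pyramid_numbers
-- ===== SOURCE A (Python) =====
-- def generate_pyramid_numbers(count=None, start=None, end=None):
--     pyramid_numbers = []
--
--     if count is not None:
--         for n in range(1, count + 1):
--             number = n * (n + 1) * (n + 2) // 6
--             pyramid_numbers.append(number)
--     elif start is not None and end is not None:
--         n = 1
--         while True:
--             number = n * (n + 1) * (n + 2) // 6
--             if number > end:
--                 break
--             if number >= start:
--                 pyramid_numbers.append(number)
--             n += 1
--     else:
--         raise ValueError("Не коректні дані")
--
--     return pyramid_numbers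
-- ===== SOURCE B (Python) =====
-- def _tetra_upto(end):
--     # all tetrahedral numbers <= end, via running triangular/tetrahedral sums
--     tets = []
--     tri = 0
--     tet = 0
--     n = 1
--     while True:
--         tri += n
--         tet += tri
--         if tet > end:
--             return tets
--         tets.append(tet)
--         n += 1
--
--
-- def generate_pyramid_numbers(count=None, start=None, end=None):
--     if count is not None:
--         tets = []
--         tri = 0
--         tet = 0
--         for n in range(1, count + 1):
--             tri += n
--             tet += tri
--             tets.append(tet)
--         return tets
--     if start is None or end is None:
--         raise ValueError("Не коректні дані")
--     return [t for t in _tetra_upto(end) if t >= start]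
-- ===== Notes on version B (the rewrite author's own statement) =====
-- stated objective: alternative
-- what changed: B replaces the per-term closed form n*(n+1)*(n+2)//6 with running triangular/tetrahedral accumulators (tri += n; tet += tri), and in the range branch first collects all tetrahedral numbers <= end and then filters >= start in a comprehension instead of filtering inside the generating loop.
import Mathlib
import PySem

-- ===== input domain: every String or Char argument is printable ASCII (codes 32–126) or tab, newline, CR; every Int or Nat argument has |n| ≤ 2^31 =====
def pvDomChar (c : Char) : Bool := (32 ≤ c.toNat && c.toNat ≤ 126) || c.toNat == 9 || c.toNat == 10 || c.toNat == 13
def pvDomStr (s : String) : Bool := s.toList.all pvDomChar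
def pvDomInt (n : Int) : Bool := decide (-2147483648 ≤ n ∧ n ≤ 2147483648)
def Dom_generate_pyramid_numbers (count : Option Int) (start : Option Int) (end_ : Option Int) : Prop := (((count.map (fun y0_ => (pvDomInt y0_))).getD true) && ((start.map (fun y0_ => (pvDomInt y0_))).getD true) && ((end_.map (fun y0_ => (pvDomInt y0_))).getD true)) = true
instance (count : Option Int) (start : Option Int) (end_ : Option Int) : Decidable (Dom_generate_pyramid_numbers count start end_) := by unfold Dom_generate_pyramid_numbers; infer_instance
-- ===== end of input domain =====

-- B replaces the closed form n*(n+1)*(n+2)//6 by running sums (tri += n; tet += tri) and, in the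
-- range branch, collects all tetrahedral numbers ≤ end first and filters ≥ start afterwards
-- (objective: alternative decomposition, not claimed faster).

-- ===== PORT A =====
-- A's while-loop, fueled (fuel is an upper bound on iterations only; the loop breaks on its own
-- once n*(n+1)*(n+2)//6 > end_, which happens at n ≤ max(1, end_+1), so fuel end_.toNat+2 suffices).
def pvA_while (start end_ : Int) (fuel : Nat) (n : Int) (acc : List Int) : List Int :=
  match fuel with
  | 0 => acc
  | f+1 =>
    let number := PySem.Int.floordiv (n*(n+1)*(n+2)) 6
    if number > end_ then acc
    else pvA_while start end_ f (n+1) (if number ≥ start then acc ++ [number] else acc)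

def generate_pyramid_numbers (count : Option Int) (start : Option Int) (end_ : Option Int) : List Int :=
  match count with
  | some c =>
      (PySem.List.pyRange 1 (c+1) 1).foldl
        (fun acc n => acc ++ [PySem.Int.floordiv (n*(n+1)*(n+2)) 6]) []
  | none =>
    match start, end_ with
    | some s, some e => pvA_while s e (e.toNat + 2) 1 []
    | _, _ => []   -- Python raises ValueError here; excluded by Pre_

-- ===== PORT B =====
-- B's _tetra_upto while-loop, same fuel bound as A's loop (tet grows at least as fast as n).
def pvB_upto (end_ : Int) (fuel : Nat) (n tri tet : Int) (acc : List Int) : List Int :=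
  match fuel with
  | 0 => acc
  | f+1 =>
    let tri' := tri + n
    let tet' := tet + tri'
    if tet' > end_ then acc
    else pvB_upto end_ f (n+1) tri' tet' (acc ++ [tet'])

def generate_pyramid_numbers_alt (count : Option Int) (start : Option Int) (end_ : Option Int) : List Int :=
  match count with
  | some c =>
      ((PySem.List.pyRange 1 (c+1) 1).foldl
        (fun (st : Int × Int × List Int) n =>
          let tri := st.1 + n
          let tet := st.2.1 + tri
          (tri, tet, st.2.2 ++ [tet])) (0, 0, [])).2.2
  | none =>
    match start with
    | none => []   -- Python raises ValueError here; excluded by Pre_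
    | some s =>
      match end_ with
      | none => []   -- Python raises ValueError here; excluded by Pre_
      | some e => (pvB_upto e (e.toNat + 2) 1 0 0 []).filter (fun t => decide (s ≤ t))

-- ===== PRECONDITION & SPEC =====
-- Pre_ excludes exactly the inputs where A raises ValueError (count is None and start or end is None).
def Pre_generate_pyramid_numbers (count : Option Int) (start : Option Int) (end_ : Option Int) : Prop :=
  count.isSome ∨ (start.isSome ∧ end_.isSome)
instance (count : Option Int) (start : Option Int) (end_ : Option Int) : Decidable (Pre_generate_pyramid_numbers count start end_) := by unfold Pre_generate_pyramid_numbers; infer_instance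

def pvWitness_generate_pyramid_numbers : Option Int × Option Int × Option Int := (some 5, none, none)

def Spec_generate_pyramid_numbers (count : Option Int) (start : Option Int) (end_ : Option Int) (out : List Int) : Prop := out = generate_pyramid_numbers_alt count start end_
instance (count : Option Int) (start : Option Int) (end_ : Option Int) (out : List Int) : Decidable (Spec_generate_pyramid_numbers count start end_ out) := by unfold Spec_generate_pyramid_numbers; infer_instance

-- ===== CLAIM (what is proved, stated in full; the proofs are below) =====
def Claim_equal_generate_pyramid_numbers : Prop := ∀ (count : Option Int) (start : Option Int) (end_ : Option Int), Dom_generate_pyramid_numbers count start end_ → Pre_generate_pyramid_numbers count start end_ → Spec_generate_pyramid_numbers count start end_ (generate_pyramid_numbers count start end_)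

-- ===== LEMMAS AND PROOFS =====

-- With the loop invariants 2*tri = (n-1)*n and 6*tet = (n-1)*n*(n+1), the next accumulated
-- tetrahedral value equals A's closed form.
lemma pv_tet_closed (n tri tet : Int) (h2 : 2*tri = (n-1)*n) (h6 : 6*tet = (n-1)*n*(n+1)) :
    PySem.Int.floordiv (n*(n+1)*(n+2)) 6 = tet + (tri + n) := by
  have h : n*(n+1)*(n+2) = 6*(tet + (tri + n)) := by linear_combination -h6 - 3*h2
  rw [h, PySem.Int.floordiv_eq_ediv_of_pos (by norm_num)]
  exact Int.mul_ediv_cancel_left _ (by norm_num)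

lemma pv_count_eq (b : Int) : ∀ (fm : Nat) (n tri tet : Int) (acc : List Int),
    fm = (b - n).toNat → 2*tri = (n-1)*n → 6*tet = (n-1)*n*(n+1) →
    (PySem.List.pyRange n b 1).foldl
        (fun acc n => acc ++ [PySem.Int.floordiv (n*(n+1)*(n+2)) 6]) acc
      = ((PySem.List.pyRange n b 1).foldl
        (fun (st : Int × Int × List Int) n =>
          let tri := st.1 + n
          let tet := st.2.1 + tri
          (tri, tet, st.2.2 ++ [tet])) (tri, tet, acc)).2.2 := by
  intro fm
  induction fm with
  | zero =>
      intro n tri tet acc hfm _ _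
      rw [PySem.List.pyRange_one_eq_nil (by omega)]
      simp
  | succ m ih =>
      intro n tri tet acc hfm h2 h6
      rw [PySem.List.pyRange_one_cons (by omega)]
      simp only [List.foldl_cons]
      rw [pv_tet_closed n tri tet h2 h6]
      exact ih (n+1) (tri+n) (tet+(tri+n)) (acc ++ [tet+(tri+n)]) (by omega)
        (by linear_combination h2) (by linear_combination h6 + 3*h2)

lemma pv_while_eq (st en : Int) : ∀ (f : Nat) (n tri tet : Int) (accA accB : List Int),
    2*tri = (n-1)*n → 6*tet = (n-1)*n*(n+1) →
    accA = accB.filter (fun t => decide (st ≤ t)) →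
    pvA_while st en f n accA = (pvB_upto en f n tri tet accB).filter (fun t => decide (st ≤ t)) := by
  intro f
  induction f with
  | zero => intro n tri tet accA accB _ _ hacc; simpa [pvA_while, pvB_upto] using hacc
  | succ m ih =>
      intro n tri tet accA accB h2 h6 hacc
      simp only [pvA_while, pvB_upto]
      rw [pv_tet_closed n tri tet h2 h6]
      by_cases hbr : tet + (tri + n) > en
      · simp [hbr, hacc]
      · simp only [hbr, ite_false]
        exact ih (n+1) (tri+n) (tet+(tri+n)) _ _ (by linear_combination h2)
          (by linear_combination h6 + 3*h2)
          (by by_cases hst : tet + (tri + n) ≥ st <;>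
                simp [List.filter_append, hst, hacc, ge_iff_le])

-- ===== VERDICT (by name: the statement is the Claim_ definition above) =====
theorem generate_pyramid_numbers_spec : Claim_equal_generate_pyramid_numbers := by
  intro count start end_ _ hpre
  unfold Spec_generate_pyramid_numbers generate_pyramid_numbers generate_pyramid_numbers_alt
  match count, start, end_ with
  | some c, _, _ =>
      simpa using pv_count_eq (c+1) ((c+1) - 1).toNat 1 0 0 [] rfl (by ring) (by ring)
  | none, some s, some e =>
      simpa using pv_while_eq s e (e.toNat + 2) 1 0 0 [] [] (by ring) (by ring) rfl
  | none, some _, none => exact absurd hpre (by simp [Pre_generate_pyramid_numbers])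
  | none, none, _ => exact absurd hpre (by simp [Pre_generate_pyramid_numbers])
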